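-- pv_equiv track=rewrite | github.com/JasmineSJYThompson/words-database | get_book_chunks.py | get_chunks_up_to_size
-- ===== SOURCE A (Python) =====
-- def is_proper(word):
--     # Checks if the word has the format of a proper noun
--     if word.isalpha() and word[0].isupper() and word[1::].islower():
--         return True
--     else:
--         return False
--
-- def get_word_chunks(chunk_size, words):
--     return [[words[i+j] for j in range(chunk_size)] for i in range(len(words)-chunk_size+1)]
--
-- def get_proper_word_chunks(chunk_size, words):
--     word_chunks = get_word_chunks(chunk_size, words)
--     proper_word_chunks = []
--     for word_chunk in word_chunks:
--         if sum([is_proper(word) for word in word_chunk]) == chunk_size: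
--             proper_word_chunks.append(word_chunk)
--     return proper_word_chunks
--
-- def get_chunks_up_to_size(text, size):
--     words = text.split(" ")
--     chunks = []
--     for chunk_size in range(1, size + 1):
--         unstring_pwc = get_proper_word_chunks(chunk_size, words)
--         string_pwc = [" ".join(s) for s in unstring_pwc]
--         chunks.append(string_pwc)
--     chunks.reverse()
--     return chunks
-- ===== SOURCE B (Python) =====
-- def is_proper(word):
--     # Same proper-noun test as A: all-alpha, leading upper, rest lower
--     return word.isalpha() and word[0].isupper() and word[1:].islower()
--
-- def get_chunks_up_to_size(text, size):
--     words = text.split(" ")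
--     n = len(words)
--     # streak[i] = number of consecutive proper words starting at index i (one O(n) pass)
--     streak = [0] * (n + 1)
--     for i in range(n - 1, -1, -1):
--         streak[i] = streak[i + 1] + 1 if is_proper(words[i]) else 0
--     out = []
--     for c in range(size, 0, -1):
--         out.append([" ".join(words[i:i + c])
--                     for i in range(n - c + 1) if streak[i] >= c])
--     return out
-- ===== Notes on version B (the rewrite author's own statement) =====
-- stated objective: faster
-- what changed: Instead of materializing every window for every chunk size and summing an is_proper test over each window, B computes in one backward pass the run-length streak[i] of consecutive proper words at each index, so each window is accepted by a single O(1) comparison and only valid chunks are ever built (rows are also emitted largest-size-first directly, no reverse).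
import Mathlib
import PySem

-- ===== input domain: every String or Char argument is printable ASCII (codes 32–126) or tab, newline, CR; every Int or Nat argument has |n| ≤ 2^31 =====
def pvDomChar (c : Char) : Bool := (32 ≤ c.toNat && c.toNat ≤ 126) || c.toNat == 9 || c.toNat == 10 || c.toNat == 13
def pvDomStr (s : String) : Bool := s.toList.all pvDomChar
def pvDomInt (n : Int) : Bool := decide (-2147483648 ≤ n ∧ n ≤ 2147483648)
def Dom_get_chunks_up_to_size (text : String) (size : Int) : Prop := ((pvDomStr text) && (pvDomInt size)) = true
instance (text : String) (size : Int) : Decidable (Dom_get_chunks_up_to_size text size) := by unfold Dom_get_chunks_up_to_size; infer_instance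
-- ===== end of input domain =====

-- B replaces A's per-size window materialization and per-window is_proper sums by one
-- backward pass of consecutive-proper-run lengths, making each window test O(1) (objective: faster).

-- shared helper: Python is_proper, textually identical in A and in Source B.
-- str.islower() on word[1:] hand-ported: all cased chars lower and at least one cased char
-- (exact on the ASCII domain, where cased chars are exactly A-Z/a-z).
def pvStrIslower (cs : List Char) : Bool :=
  cs.all (fun c => !PySem.Chars.isupper c) && cs.any PySem.Chars.islower

-- word[0].isupper() on the 1-char string word[0] = the char-level isupper (exact on ASCII);
-- word[0] never raises here: it is evaluated only after word.isalpha() guarantees word ≠ "".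
def pv_is_proper (w : String) : Bool :=
  PySem.Str.strIsalpha w
    && ((PySem.List.pyGet? w.toList 0).elim false PySem.Chars.isupper)
    && pvStrIslower (PySem.List.slice w.toList (some 1) none)

-- ===== PORT A =====
-- all indices i+j are in range here (i < len-cs+1, j < cs), so pyGetD's default is never used
def pv_get_word_chunks (chunk_size : Int) (words : List String) : List (List String) :=
  (PySem.List.pyRange 0 ((words.length : Int) - chunk_size + 1) 1).map (fun i =>
    (PySem.List.pyRange 0 chunk_size 1).map (fun j =>
      PySem.List.pyGetD words (i + j) ""))

def pv_get_proper_word_chunks (chunk_size : Int) (words : List String) : List (List String) :=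
  (pv_get_word_chunks chunk_size words).foldl
    (fun acc ch =>
      if ((ch.map (fun w => if pv_is_proper w then (1 : Int) else 0)).sum == chunk_size)
      then acc ++ [ch] else acc) []

def get_chunks_up_to_size (text : String) (size : Int) : List (List String) :=
  let words := (PySem.Str.split? text " ").getD []   -- sep " " is nonempty: split? never returns none
  ((PySem.List.pyRange 1 (size + 1) 1).foldl
    (fun chunks cs =>
      chunks ++ [(pv_get_proper_word_chunks cs words).map (fun s => PySem.Str.join " " s)])
    []).reverse

-- ===== PORT B =====
-- streak[i] = number of consecutive proper words starting at i; Source B's backward loop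
-- as the obvious structural recursion (streak[i] from streak[i+1])
def pv_streaks (words : List String) : List Int :=
  match words with
  | [] => []
  | w :: rest =>
      let s := pv_streaks rest
      (if pv_is_proper w then s.headD 0 + 1 else 0) :: s

def get_chunks_up_to_size_alt (text : String) (size : Int) : List (List String) :=
  let words := (PySem.Str.split? text " ").getD []   -- sep " " is nonempty: split? never returns none
  let n : Int := (words.length : Int)
  let streak := pv_streaks words
  (PySem.List.pyRange size 0 (-1)).map (fun c =>
    ((PySem.List.pyRange 0 (n - c + 1) 1).filter (fun i =>
        decide (c ≤ PySem.List.pyGetD streak i 0))).map (fun i =>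
      PySem.Str.join " " (PySem.List.slice words (some i) (some (i + c)))))

-- ===== PRECONDITION & SPEC =====
def Spec_get_chunks_up_to_size (text : String) (size : Int) (out : List (List String)) : Prop := out = get_chunks_up_to_size_alt text size
instance (text : String) (size : Int) (out : List (List String)) : Decidable (Spec_get_chunks_up_to_size text size out) := by unfold Spec_get_chunks_up_to_size; infer_instance

-- ===== CLAIM (what is proved, stated in full; the proofs are below) =====
def Claim_equal_get_chunks_up_to_size : Prop := ∀ (text : String) (size : Int), Dom_get_chunks_up_to_size text size → Spec_get_chunks_up_to_size text size (get_chunks_up_to_size text size)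

-- ===== LEMMAS AND PROOFS =====

-- streak values: (pv_streaks ws).getD k 0 is the length of the proper-prefix of ws.drop k
theorem pv_streaks_getD (ws : List String) (k : Nat) (hk : k < ws.length) :
    (pv_streaks ws).getD k 0 = (((ws.drop k).takeWhile pv_is_proper).length : Int) := by
  induction ws generalizing k with
  | nil => simp at hk
  | cons w rest ih =>
    rw [pv_streaks]
    cases k with
    | zero =>
      have hhead : (pv_streaks rest).headD 0 = ((rest.takeWhile pv_is_proper).length : Int) := by
        cases rest with
        | nil => rw [pv_streaks]; simp
        | cons y t =>
          have h0 := ih 0 (by simp)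
          rw [pv_streaks] at h0 ⊢
          simpa using h0
      simp only [List.getD_cons_zero, List.drop_zero, List.takeWhile_cons]
      by_cases hw : pv_is_proper w
      · rw [if_pos hw, if_pos hw, hhead]; push_cast [List.length_cons]; ring
      · simp [hw]
    | succ k =>
      simp only [List.getD_cons_succ, List.drop_succ_cons]
      exact ih k (by simpa using hk)

-- m ≤ takeWhile-length ↔ the first m elements all satisfy p
theorem takeWhile_len_le_iff {α : Type} (p : α → Bool) (m : Nat) (l : List α) (hm : m ≤ l.length) :
    (m ≤ (l.takeWhile p).length ↔ ∀ x ∈ l.take m, p x) := by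
  induction l generalizing m with
  | nil => simp at hm; simp [hm]
  | cons x t ih =>
    cases m with
    | zero => simp
    | succ m =>
      by_cases hx : p x
      · simp [hx, ih m (by simpa using hm)]
      · simp [hx]

-- A's inner comprehension IS the slice words[k:k+c]
theorem pv_window_eq (words : List String) (k c : Nat) (h : k + c ≤ words.length) :
    (PySem.List.pyRange 0 (c : Int) 1).map (fun j => PySem.List.pyGetD words ((k : Nat) + j) "") =
      (words.drop k).take c := by
  rw [PySem.List.pyRange_zero_natCast, List.map_map]
  apply List.ext_getElem
  · simp; omega
  · intro i h1 h2
    simp only [List.getElem_map, List.getElem_range, Function.comp_apply, List.getElem_take,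
      List.getElem_drop]
    rw [show (k : Int) + (i : Int) = ((k + i : Nat) : Int) by push_cast; ring,
      PySem.List.pyGetD_natCast]
    simp at h1
    rw [List.getD_eq_getElem _ _ (by omega)]

theorem pv_row_eq (words : List String) (c : Int) (hc : 1 ≤ c) :
    (pv_get_proper_word_chunks c words).map (fun s => PySem.Str.join " " s) =
      ((PySem.List.pyRange 0 ((words.length : Int) - c + 1) 1).filter (fun i =>
          decide (c ≤ PySem.List.pyGetD (pv_streaks words) i 0))).map (fun i =>
        PySem.Str.join " " (PySem.List.slice words (some i) (some (i + c)))) := by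
  unfold pv_get_proper_word_chunks pv_get_word_chunks
  rw [PySem.List.foldl_append_if _ (fun ch => ch)]
  simp only [List.nil_append, List.filter_map, List.map_map]
  apply Eq.trans (List.map_congr_left (g :=
      (fun i => PySem.Str.join " " (PySem.List.slice words (some i) (some (i + c))))) ?_)
  · apply congrArg
    apply List.filter_congr
    intro i hi
    rw [PySem.List.mem_pyRange_one] at hi
    obtain ⟨h0, h1⟩ := hi
    have hik : i = ((i.toNat : Nat) : Int) := by omega
    have hck : c = ((c.toNat : Nat) : Int) := by omega
    have hbound : i.toNat + c.toNat ≤ words.length := by omega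
    have hkn : i.toNat < words.length := by omega
    simp only [Function.comp_apply]
    rw [hik, hck, pv_window_eq words i.toNat c.toNat hbound,
      PySem.List.sum_map_ite_one_zero, PySem.List.pyGetD_natCast,
      pv_streaks_getD words i.toNat hkn]
    have hlen : ((words.drop i.toNat).take c.toNat).length = c.toNat := by
      simp; omega
    rw [Bool.beq_eq_decide_eq, decide_eq_decide]
    rw [Nat.cast_inj, Nat.cast_le]
    rw [takeWhile_len_le_iff pv_is_proper c.toNat ((words.drop i.toNat)) (by simp; omega)]
    constructor
    · intro h
      exact (List.countP_eq_length (p := pv_is_proper)).1 (h.trans hlen.symm)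
    · intro h
      exact ((List.countP_eq_length (p := pv_is_proper)).2 h).trans hlen
  · intro i hi
    have hi' := List.mem_of_mem_filter hi
    rw [PySem.List.mem_pyRange_one] at hi'
    obtain ⟨h0, h1⟩ := hi'
    have hik : i = ((i.toNat : Nat) : Int) := by omega
    have hck : c = ((c.toNat : Nat) : Int) := by omega
    have hbound : i.toNat + c.toNat ≤ words.length := by omega
    simp only [Function.comp_apply]
    rw [hik, hck, pv_window_eq words i.toNat c.toNat hbound,
      PySem.List.slice_natCast_add]

-- ===== VERDICT (by name: the statement is the Claim_ definition above) =====
theorem get_chunks_up_to_size_spec : Claim_equal_get_chunks_up_to_size := by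
  intro text size _
  show _ = _
  unfold get_chunks_up_to_size get_chunks_up_to_size_alt
  dsimp only
  rw [PySem.List.foldl_append_singleton_eq_map, PySem.List.pyRange_neg_one_eq_reverse]
  simp only [List.nil_append, zero_add, List.map_reverse]
  congr 1
  exact List.map_congr_left (fun c hc => pv_row_eq _ c ((PySem.List.mem_pyRange_one.1 hc).1))
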